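-- pv_equiv track=rewrite | github.com/JohnUrban/sciaratools2 | seqtools/extractFastxEntries.py | ignore_case_regex
-- ===== SOURCE A (Python) =====
-- import sys, string
--
-- def ignore_case_regex(regex):
--     new_re = ''
--     for ltr in regex.lower():
--         if ltr in string.ascii_lowercase:
--             new_re += '[' + ltr.upper() + ltr + ']'
--         else:
--             new_re += ltr
--     return new_re
-- ===== SOURCE B (Python) =====
-- import string
--
-- def _expand(s):
--     # divide and conquer on the (already lowered) string
--     if len(s) == 0:
--         return ''
--     if len(s) == 1:
--         return '[' + s.upper() + s + ']' if s in string.ascii_lowercase else s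
--     mid = len(s) // 2
--     return _expand(s[:mid]) + _expand(s[mid:])
--
-- def ignore_case_regex(regex):
--     return _expand(regex.lower())
-- ===== Notes on version B (the rewrite author's own statement) =====
-- stated objective: alternative
-- what changed: Replaced A's sequential loop with membership branch and incremental accumulator by a recursive divide-and-conquer: lower the string once, split it in half, expand each half recursively and concatenate, with the single-character base case doing the bracket expansion.
import Mathlib
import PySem

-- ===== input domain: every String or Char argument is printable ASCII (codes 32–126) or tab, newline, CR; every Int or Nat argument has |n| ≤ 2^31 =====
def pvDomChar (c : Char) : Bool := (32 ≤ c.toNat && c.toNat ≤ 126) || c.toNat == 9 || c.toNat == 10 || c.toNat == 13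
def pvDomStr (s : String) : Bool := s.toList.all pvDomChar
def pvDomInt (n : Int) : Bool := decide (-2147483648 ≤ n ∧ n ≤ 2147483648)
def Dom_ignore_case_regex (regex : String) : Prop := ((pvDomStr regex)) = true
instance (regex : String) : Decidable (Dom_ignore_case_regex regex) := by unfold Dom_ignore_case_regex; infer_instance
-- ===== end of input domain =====

-- B replaces A's sequential accumulator loop by a divide-and-conquer recursion (split in
-- half, expand halves, concatenate) on the lowered string: an alternative decomposition.


-- ===== PORT A =====
-- string.ascii_lowercase
def asciiLowercase : List Char := "abcdefghijklmnopqrstuvwxyz".toList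

def ignore_case_regex (regex : String) : String :=
  String.ofList ((PySem.Chars.lower regex.toList).foldl (fun new_re ltr =>
    if ltr ∈ asciiLowercase then
      new_re ++ ['['] ++ [PySem.Chars.upperChar ltr] ++ [ltr] ++ [']']
    else
      new_re ++ [ltr]) [])

-- ===== PORT B =====
-- _expand: divide and conquer on the (already lowered) character list
def icExpand : List Char → List Char
  | [] => []
  | [c] => if c ∈ asciiLowercase then ['[', PySem.Chars.upperChar c, c, ']'] else [c]
  | s@(_ :: _ :: _) =>
      icExpand (s.take (s.length / 2)) ++ icExpand (s.drop (s.length / 2))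
termination_by s => s.length
decreasing_by all_goals simp_all; omega

def ignore_case_regex_alt (regex : String) : String :=
  String.ofList (icExpand (PySem.Chars.lower regex.toList))

-- ===== PRECONDITION & SPEC =====
def Spec_ignore_case_regex (regex : String) (out : String) : Prop := out = ignore_case_regex_alt regex
instance (regex : String) (out : String) : Decidable (Spec_ignore_case_regex regex out) := by unfold Spec_ignore_case_regex; infer_instance

-- ===== CLAIM (what is proved, stated in full; the proofs are below) =====
def Claim_equal_ignore_case_regex : Prop := ∀ (regex : String), Dom_ignore_case_regex regex → Spec_ignore_case_regex regex (ignore_case_regex regex)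

-- ===== LEMMAS AND PROOFS =====

-- the per-character expansion both programs realise
def icTr (c : Char) : List Char :=
  if c ∈ asciiLowercase then ['[', PySem.Chars.upperChar c, c, ']'] else [c]

theorem foldl_eq (l acc : List Char) :
    (l.foldl (fun new_re ltr =>
      if ltr ∈ asciiLowercase then
        new_re ++ ['['] ++ [PySem.Chars.upperChar ltr] ++ [ltr] ++ [']']
      else
        new_re ++ [ltr]) acc) = acc ++ (l.map icTr).flatten := by
  induction l generalizing acc with
  | nil => simp
  | cons c t ih =>
      simp only [List.foldl_cons, List.map_cons, List.flatten_cons, ih]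
      by_cases h : c ∈ asciiLowercase <;> simp [h, icTr]

theorem icExpand_eq (l : List Char) : icExpand l = (l.map icTr).flatten := by
  induction hn : l.length using Nat.strong_induction_on generalizing l with
  | _ n ih =>
    match l, hn with
    | [], _ => simp [icExpand]
    | [c], _ => simp [icExpand, icTr]
    | (a :: b :: t), hn =>
      rw [icExpand]
      have hlen : (a :: b :: t).length = n := hn
      have h2 : 2 ≤ n := by simp at hlen; omega
      rw [ih ((a :: b :: t).length / 2) (by omega) _ (by simp; omega),
          ih ((a :: b :: t).length - (a :: b :: t).length / 2) (by omega) _ (by simp),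
          ← List.flatten_append, ← List.map_append, List.take_append_drop]

-- ===== VERDICT (by name: the statement is the Claim_ definition above) =====
theorem ignore_case_regex_spec : Claim_equal_ignore_case_regex := by
  intro regex _
  unfold Spec_ignore_case_regex ignore_case_regex ignore_case_regex_alt
  rw [foldl_eq, icExpand_eq]
  simp
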